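-- pv_equiv track=rewrite | github.com/EHwooKim/Algorithms | Test/2020_Line/problem05.py | solution
-- ===== SOURCE A (Python) =====
-- def solution(dataSource, tags):
--     tmp = []
--     for data in dataSource:
--         count = 0
--         for tag in tags:
--             if tag in data[1:]:
--                 count += 1
--         if count:
--             tmp.append([data[0], count])
--     tmp = sorted(tmp, key = lambda doc: (-doc[1], doc[0]))
--
--     result = []
--     i = 0
--     for t in tmp:
--         i += 1
--         result.append(t[0])
--         if i >= 10: break
--     return result
-- ===== SOURCE B (Python) =====
-- def solution(dataSource, tags):
--     # Bucket documents by match count, then emit buckets from the highest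
--     # possible count (len(tags)) downwards, names sorted inside each bucket.
--     buckets = {}
--     for data in dataSource:
--         body = data[1:]
--         count = sum(1 for tag in tags if tag in body)
--         if count:
--             buckets[count] = buckets.get(count, []) + [data[0]]
--     result = []
--     for c in range(len(tags), 0, -1):
--         result.extend(sorted(buckets.get(c, [])))
--     return result[:10]
-- ===== Notes on version B (the rewrite author's own statement) =====
-- stated objective: alternative
-- what changed: Replaces the single global sort by the tuple key (-count, name) plus a counted break loop with a bucket table keyed by match count, a descending sweep over the possible counts emitting each bucket's names in sorted order, and a final [:10] slice.
import Mathlib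
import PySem

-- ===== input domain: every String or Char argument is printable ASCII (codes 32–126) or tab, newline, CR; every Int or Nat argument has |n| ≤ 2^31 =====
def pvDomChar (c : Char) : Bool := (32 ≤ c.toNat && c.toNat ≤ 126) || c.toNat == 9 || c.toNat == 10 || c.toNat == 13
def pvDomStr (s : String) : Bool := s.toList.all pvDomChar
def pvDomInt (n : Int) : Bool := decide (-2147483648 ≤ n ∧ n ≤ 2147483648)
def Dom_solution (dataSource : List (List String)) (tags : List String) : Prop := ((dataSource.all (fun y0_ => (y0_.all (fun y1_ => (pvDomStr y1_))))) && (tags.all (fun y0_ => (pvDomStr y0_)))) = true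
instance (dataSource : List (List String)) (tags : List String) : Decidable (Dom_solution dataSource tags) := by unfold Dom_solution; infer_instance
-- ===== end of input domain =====

-- B replaces A's global sort by (-count, name) + counted break loop with a count-bucket
-- table swept from the highest count downwards (objective: alternative decomposition).

-- ===== PORT A =====
-- the 'for t in tmp: … if i >= 10: break' loop of A
def solutionTakeLoop : List (String × Int) → Int → List String → List String
  | [], _, result => result
  | t :: ts, i, result =>
    let i := i + 1
    let result := result ++ [t.1]
    if i ≥ 10 then result else solutionTakeLoop ts i result

def solution (dataSource : List (List String)) (tags : List String) : List String :=
  let tmp : List (String × Int) := dataSource.foldl (fun tmp data =>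
    let count : Int := tags.foldl (fun count tag =>
      if tag ∈ PySem.List.slice data (some 1) none then count + 1 else count) 0
    if count ≠ 0 then
      -- data[0]: reached only when count ≠ 0, hence data ≠ []; the 'none' branch is unreachable
      tmp ++ [((PySem.List.pyGet? data 0).getD "", count)]
    else tmp) []
  let tmp := PySem.List.sorted2 tmp (fun doc => -doc.2) (fun doc => doc.1) false
  solutionTakeLoop tmp 0 []

-- ===== PORT B =====
def solution_alt (dataSource : List (List String)) (tags : List String) : List String :=
  let buckets : PySem.Dict Int (List String) := dataSource.foldl (fun b data =>
    let body := PySem.List.slice data (some 1) none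
    let count : Int := ((tags.filter (fun tag => decide (tag ∈ body))).length : Int)
    if count ≠ 0 then
      PySem.Dict.modify b count [] (· ++ [(PySem.List.pyGet? data 0).getD ""])
    else b) PySem.Dict.empty
  let result : List String := (PySem.List.pyRange tags.length 0 (-1)).foldl
    (fun result c => result ++ PySem.List.sorted (PySem.Dict.getD buckets c []) (fun x => x) false) []
  PySem.List.slice result none (some 10)

-- ===== PRECONDITION & SPEC =====
def Spec_solution (dataSource : List (List String)) (tags : List String) (out : List String) : Prop := out = solution_alt dataSource tags
instance (dataSource : List (List String)) (tags : List String) (out : List String) : Decidable (Spec_solution dataSource tags out) := by unfold Spec_solution; infer_instance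

-- ===== CLAIM (what is proved, stated in full; the proofs are below) =====
def Claim_equal_solution : Prop := ∀ (dataSource : List (List String)) (tags : List String), Dom_solution dataSource tags → Spec_solution dataSource tags (solution dataSource tags)

-- ===== LEMMAS AND PROOFS =====

-- proof-side abbreviations
def pvCnt (tags data : List String) : Int :=
  ((tags.filter (fun tag => decide (tag ∈ PySem.List.slice data (some 1) none))).length : Int)
def pvNm (data : List String) : String := (PySem.List.pyGet? data 0).getD ""
def pvDocs (dataSource : List (List String)) (tags : List String) : List (List String) :=
  dataSource.filter (fun d => decide (pvCnt tags d ≠ 0))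
def pvBkt (dataSource : List (List String)) (tags : List String) (c : Int) : List String :=
  ((pvDocs dataSource tags).filter (fun d => decide (pvCnt tags d = c))).map pvNm
def pvTmp (dataSource : List (List String)) (tags : List String) : List (String × Int) :=
  (pvDocs dataSource tags).map (fun d => (pvNm d, pvCnt tags d))
def pvKey (e : String × Int) : Lex (Int × String) := toLex (-e.2, e.1)
def pvCs (tags : List String) : List Int := (List.range tags.length).map (fun (k : Nat) => (tags.length : Int) - (k : Int))
def pvYs (dataSource : List (List String)) (tags : List String) : List (String × Int) :=
  (pvCs tags).flatMap (fun c =>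
    (PySem.List.sorted (pvBkt dataSource tags c) (fun x => x) false).map (fun n => (n, c)))

-- A's inner counting loop is pvCnt
theorem pv_cnt_foldl (tags data : List String) :
    tags.foldl (fun count tag =>
      if tag ∈ PySem.List.slice data (some 1) none then count + 1 else count) 0 = pvCnt tags data := by
  rw [PySem.List.foldl_ite_add_one (fun tag => tag ∈ PySem.List.slice data (some 1) none)]
  simp [pvCnt, List.countP_eq_length_filter]

-- A's tmp-building loop in closed form
theorem pv_tmp_foldl (dataSource : List (List String)) (tags : List String) :
    dataSource.foldl (fun tmp data =>
      let count : Int := tags.foldl (fun count tag =>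
        if tag ∈ PySem.List.slice data (some 1) none then count + 1 else count) 0
      if count ≠ 0 then tmp ++ [((PySem.List.pyGet? data 0).getD "", count)] else tmp) []
      = pvTmp dataSource tags := by
  simp only [pv_cnt_foldl]
  rw [PySem.List.foldl_append_ite (fun d => pvCnt tags d ≠ 0)
    (fun d => ((PySem.List.pyGet? d 0).getD "", pvCnt tags d))]
  simp [pvTmp, pvDocs, pvNm]

-- the bucket-building fold, lookup in closed form
theorem pv_getD_fold (tags : List String) (l : List (List String))
    (d : PySem.Dict Int (List String)) (c : Int) :
    (l.foldl (fun b x => PySem.Dict.modify b (pvCnt tags x) [] (· ++ [pvNm x])) d).getD c []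
      = d.getD c [] ++ (l.filter (fun x => decide (pvCnt tags x = c))).map pvNm := by
  induction l generalizing d with
  | nil => simp
  | cons x l ih =>
    rw [List.foldl_cons, ih]
    by_cases hx : pvCnt tags x = c
    · subst hx
      rw [PySem.Dict.getD_modify_self]
      simp
    · rw [PySem.Dict.getD_modify_of_ne]
      · simp [hx]
      · exact fun h => hx h.symm

-- B's bucket dictionary in closed form
theorem pv_buckets_getD (dataSource : List (List String)) (tags : List String) (c : Int) :
    (dataSource.foldl (fun b data =>
      let body := PySem.List.slice data (some 1) none
      let count : Int := ((tags.filter (fun tag => decide (tag ∈ body))).length : Int)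
      if count ≠ 0 then
        PySem.Dict.modify b count [] (· ++ [(PySem.List.pyGet? data 0).getD ""])
      else b) PySem.Dict.empty).getD c []
    = pvBkt dataSource tags c := by
  show (dataSource.foldl (fun b data =>
      if pvCnt tags data ≠ 0 then
        PySem.Dict.modify b (pvCnt tags data) [] (· ++ [pvNm data])
      else b) PySem.Dict.empty).getD c [] = _
  rw [PySem.List.foldl_ite_eq_foldl_filter (fun d => pvCnt tags d ≠ 0)
    (fun b d => PySem.Dict.modify b (pvCnt tags d) [] (· ++ [pvNm d]))]
  rw [pv_getD_fold]
  simp [pvBkt, pvDocs]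

-- range(len(tags), 0, -1)
theorem pv_pyRange_desc (n : Nat) :
    PySem.List.pyRange (n : Int) 0 (-1) = (List.range n).map (fun (k : Nat) => (n : Int) - (k : Int)) := by
  simp only [PySem.List.pyRange]
  rw [if_neg (by norm_num), if_neg (by norm_num)]
  by_cases hn : (0 : Int) < (n : Int)
  · rw [if_pos hn]
    have hcount : (((n : Int) - 0 + -(-1) - 1) / -(-1)).toNat = n := by
      have : ((n : Int) - 0 + -(-1) - 1) / -(-1) = (n : Int) := by norm_num
      rw [this]; exact Int.toNat_natCast n
    rw [hcount]
    exact List.map_congr_left (fun k _ => by ring)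
  · rw [if_neg hn]
    have hz : n = 0 := by omega
    subst hz; simp

theorem pv_mem_pvCs (tags : List String) (c : Int) (h1 : 1 ≤ c) (h2 : c ≤ (tags.length : Int)) :
    c ∈ pvCs tags := by
  unfold pvCs
  have hk : ((tags.length : Int) - c).toNat < tags.length := by omega
  have hv : (fun k : Nat => (tags.length : Int) - (k : Int)) (((tags.length : Int) - c).toNat) = c := by simp only []; omega
  exact List.mem_map.mpr ⟨((tags.length : Int) - c).toNat, List.mem_range.mpr hk, hv⟩

theorem pv_cs_pairwise_gt (tags : List String) : (pvCs tags).Pairwise (fun a b => b < a) := by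
  unfold pvCs
  exact List.Pairwise.map (fun (k : Nat) => (tags.length : Int) - (k : Int))
    (fun a b (h : a < b) => by
      change (tags.length : Int) - (b : Int) < (tags.length : Int) - (a : Int); omega)
    List.pairwise_lt_range

-- a list is a permutation of its fibers over any duplicate-free key list covering it
theorem pv_perm_flatMap_filter {α κ : Type} [DecidableEq κ] (ks : List κ) (xs : List α)
    (f : α → κ) (hnd : ks.Nodup) (hmem : ∀ x ∈ xs, f x ∈ ks) :
    (ks.flatMap (fun k => xs.filter (fun x => decide (f x = k)))).Perm xs := by
  induction ks generalizing xs with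
  | nil =>
    have hx : xs = [] := by
      cases xs with
      | nil => rfl
      | cons a l => exact absurd (hmem a (by simp)) (by simp)
    simp [hx]
  | cons k ks ih =>
    rw [List.flatMap_cons]
    have hks : ks.Nodup := (List.nodup_cons.mp hnd).2
    have hknot : k ∉ ks := (List.nodup_cons.mp hnd).1
    have hstep : ∀ k' ∈ ks, xs.filter (fun x => decide (f x = k'))
        = (xs.filter (fun x => !decide (f x = k))).filter (fun x => decide (f x = k')) := by
      intro k' hk'
      rw [List.filter_filter]
      refine (List.filter_congr ?_).symm
      intro x _
      by_cases hx : f x = k'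
      · simp only [hx, decide_true]
        have : k' ≠ k := fun h => hknot (h ▸ hk')
        simp [this]
      · simp [hx]
    have hflat : ks.flatMap (fun k' => xs.filter (fun x => decide (f x = k')))
        = ks.flatMap (fun k' => (xs.filter (fun x => !decide (f x = k))).filter
            (fun x => decide (f x = k'))) := List.flatMap_congr hstep
    rw [hflat]
    have hperm := ih (xs.filter (fun x => !decide (f x = k))) hks (fun x hx => by
      have hxs := List.mem_of_mem_filter hx
      have hne : decide (f x = k) = false := by
        have := (List.mem_filter.mp hx).2
        simpa using this
      have := hmem x hxs
      simp only [List.mem_cons] at this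
      rcases this with h | h
      · exact absurd h (by simpa using hne)
      · exact h)
    exact (List.Perm.append_left _ hperm).trans (List.filter_append_perm _ xs)

theorem pv_takeLoop (ts : List (String × Int)) :
    ∀ (i : Int) (res : List String), 0 ≤ i → i ≤ 9 →
      solutionTakeLoop ts i res = res ++ (ts.map (fun t => t.1)).take (10 - i).toNat := by
  induction ts with
  | nil => intro i res _ _; simp [solutionTakeLoop]
  | cons t ts ih =>
    intro i res h0 h9
    simp only [solutionTakeLoop]
    by_cases h : i + 1 ≥ 10
    · rw [if_pos h]
      have : i = 9 := by omega
      subst this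
      simp
    · rw [if_neg h]
      rw [ih (i + 1) (res ++ [t.1]) (by omega) (by omega)]
      have h10 : (10 - i).toNat = (10 - (i+1)).toNat + 1 := by omega
      simp [h10, List.take_succ_cons]

-- sorted2 with two keys is sorted with the lexicographic key
theorem pv_sorted2_eq_sorted_lex {α : Type} (xs : List α) (k1 : α → Int) (k2 : α → String) :
    PySem.List.sorted2 xs k1 k2 false
      = PySem.List.sorted xs (fun x => toLex (k1 x, k2 x)) false := by
  have hbf : (fun (a b : α) => decide (k1 a < k1 b) || (!decide (k1 b < k1 a) && decide (k2 a < k2 b)))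
      = fun (a b : α) => decide (toLex (k1 a, k2 a) < toLex (k1 b, k2 b)) := by
    funext a b
    rcases lt_trichotomy (k1 a) (k1 b) with h | h | h
    · simp [Prod.Lex.lt_iff, h]
    · simp [Prod.Lex.lt_iff, h]
    · simp [Prod.Lex.lt_iff, h, not_lt_of_gt h, ne_of_gt h]
  simp only [PySem.List.sorted2, PySem.List.sorted, Bool.false_eq_true, if_false]
  rw [hbf]

theorem pv_key_injective : Function.Injective pvKey := by
  intro a b h
  unfold pvKey at h
  have := congrArg ofLex h
  simp at this
  obtain ⟨h1, h2⟩ := this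
  exact Prod.ext h2 (by omega)

theorem pv_cs_nodup (tags : List String) : (pvCs tags).Nodup := by
  unfold pvCs
  exact List.Nodup.map (fun a b h => by omega) (List.nodup_range)

-- the fiber of pvTmp over a count value is the bucket, tagged with that count
theorem pv_tmp_filter (dataSource : List (List String)) (tags : List String) (c : Int) :
    (pvTmp dataSource tags).filter (fun e => decide (e.2 = c))
      = (pvBkt dataSource tags c).map (fun n => (n, c)) := by
  unfold pvTmp pvBkt
  rw [List.filter_map, List.map_map]
  simp only [Function.comp_def]
  apply List.map_congr_left
  intro d hd
  have : pvCnt tags d = c := by simpa using (List.mem_filter.mp hd).2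
  simp [this]

theorem pv_ys_perm_tmp (dataSource : List (List String)) (tags : List String) :
    (pvYs dataSource tags).Perm (pvTmp dataSource tags) := by
  unfold pvYs
  have h1 : ∀ c ∈ pvCs tags,
      ((PySem.List.sorted (pvBkt dataSource tags c) (fun x => x) false).map
        (fun n => (n, c))).Perm
      ((pvTmp dataSource tags).filter (fun e => decide (e.2 = c))) := by
    intro c _
    rw [pv_tmp_filter]
    exact (PySem.List.sorted_perm _ _ _).map _
  refine (List.Perm.flatMap (List.Perm.refl (pvCs tags)) h1).trans ?_
  refine pv_perm_flatMap_filter (pvCs tags) (pvTmp dataSource tags) (fun e => e.2)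
    (pv_cs_nodup tags) ?_
  intro e he
  obtain ⟨d, hd, rfl⟩ := List.mem_map.mp he
  have hd' : pvCnt tags d ≠ 0 := by simpa using (List.mem_filter.mp hd).2
  have h0 : 0 ≤ pvCnt tags d := by unfold pvCnt; positivity
  have hle : pvCnt tags d ≤ (tags.length : Int) := by
    unfold pvCnt
    exact_mod_cast List.length_filter_le _ tags
  show pvCnt tags d ∈ pvCs tags
  exact pv_mem_pvCs tags _ (by omega) hle

theorem pv_ys_pairwise (dataSource : List (List String)) (tags : List String) :
    (pvYs dataSource tags).Pairwise (fun a b => pvKey a ≤ pvKey b) := by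
  unfold pvYs
  rw [List.pairwise_flatMap]
  constructor
  · intro c _
    refine List.Pairwise.map _ ?_
      (PySem.List.sorted_pairwise (pvBkt dataSource tags c) (fun x => x))
    intro a b hab
    unfold pvKey
    rw [Prod.Lex.le_iff]
    right
    exact ⟨rfl, hab⟩
  · refine (pv_cs_pairwise_gt tags).imp ?_
    intro c1 c2 h x hx y hy
    obtain ⟨a, _, rfl⟩ := List.mem_map.mp hx
    obtain ⟨b, _, rfl⟩ := List.mem_map.mp hy
    unfold pvKey
    rw [Prod.Lex.le_iff]
    left
    simpa using by omega

theorem pv_sorted2_tmp (dataSource : List (List String)) (tags : List String) :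
    PySem.List.sorted2 (pvTmp dataSource tags) (fun doc => -doc.2) (fun doc => doc.1) false
      = pvYs dataSource tags := by
  rw [pv_sorted2_eq_sorted_lex]
  refine PySem.List.eq_of_perm_of_pairwise_le_of_injective pvKey pv_key_injective
    ((PySem.List.sorted_perm _ _ _).trans (pv_ys_perm_tmp dataSource tags).symm) ?_
    (pv_ys_pairwise dataSource tags)
  exact PySem.List.sorted_pairwise _ (fun e : String × Int => toLex (-e.2, e.1))

theorem pv_slice_take (xs : List String) : PySem.List.slice xs none (some 10) = xs.take 10 := by
  simp only [PySem.List.slice, PySem.List.clampIdx]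
  norm_num
  omega

-- ===== VERDICT (by name: the statement is the Claim_ definition above) =====
theorem solution_spec : Claim_equal_solution := by
  intro dataSource tags _
  show solution dataSource tags = solution_alt dataSource tags
  rw [solution, solution_alt]
  simp only [pv_tmp_foldl, pv_sorted2_tmp, pv_buckets_getD]
  rw [pv_takeLoop _ 0 [] (by omega) (by omega)]
  rw [show ((tags.length : Int)) = ((tags.length : Nat) : Int) from rfl, pv_pyRange_desc]
  rw [← pvCs]
  rw [PySem.List.foldl_append_eq_flatMap]
  rw [pv_slice_take]
  simp [pvYs, List.map_flatMap, List.map_map, Function.comp_def]
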